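-- pv_equiv track=rewrite | github.com/MichiasAsnake/decopressdaily | daily_orders.py | determine_letter_code
-- ===== SOURCE A (Python) =====
-- def determine_letter_code(page, process_codes, description, job_number):
--     """Determine the letter code based on process codes and description"""
--     # Convert to uppercase for case-insensitive comparison
--     description_upper = description.upper() if description else ""
--     process_codes_upper = [code.upper() for code in process_codes]
--
--     # Flag to track if we need to check HW details
--     has_hw = "HW" in process_codes_upper
--
--     # Check immediate classifications first, but mark HW for later inspection
--     if "AP" in process_codes_upper and "EM" in process_codes_upper:
--         if has_hw:
--             # Mark for HW inspection even though it has EM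
--             return "HW/EMB"
--         return "SUB/EMB"
--     elif "AP" in process_codes_upper:
--         if has_hw:
--             # Mark for HW inspection even though it has AP
--             return "HW/SUB"
--         return "SUB"
--     elif "EM" in process_codes_upper:
--         if has_hw:
--             # Mark for HW inspection even though it has EM
--             return "HW/EMB"
--         return "EMB"
--     elif "DS" in process_codes_upper:
--         if has_hw:
--             # Mark for HW inspection even though it has DS
--             return "HW/ETCH"
--         return "ETCH"
--     # Check for HW as last priority if no other codes matched
--     elif has_hw:
--         # Initially just mark as HW, we'll check details later
--         return "HW"
--
--     # Default if nothing matches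
--     return ""
-- ===== SOURCE B (Python) =====
-- def determine_letter_code(page, process_codes, description, job_number):
--     """One pass sets four flags; the result string is then BUILT compositionally:
--     the HW case picks one suffix to append after "HW/", the non-HW case joins the
--     present base parts ("SUB", "EMB") with "/" and falls back to "ETCH"/""."""
--     ap = em = ds = hw = False
--     for code in process_codes:
--         u = code.upper()
--         ap = ap or u == "AP"
--         em = em or u == "EM"
--         ds = ds or u == "DS"
--         hw = hw or u == "HW"
--     if hw:
--         suffix = "EMB" if em else ("SUB" if ap else ("ETCH" if ds else ""))
--         return "HW/" + suffix if suffix else "HW"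
--     parts = []
--     if ap:
--         parts.append("SUB")
--     if em:
--         parts.append("EMB")
--     if parts:
--         return "/".join(parts)
--     return "ETCH" if ds else ""
-- ===== Notes on version B (the rewrite author's own statement) =====
-- stated objective: alternative
-- what changed: B makes a single pass over the codes accumulating four boolean flags and then BUILDS the result string compositionally (a '/'-join of the present base parts, or 'HW/' plus one chosen suffix), instead of A's repeated membership scans and eight literal return statements.
import Mathlib
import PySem

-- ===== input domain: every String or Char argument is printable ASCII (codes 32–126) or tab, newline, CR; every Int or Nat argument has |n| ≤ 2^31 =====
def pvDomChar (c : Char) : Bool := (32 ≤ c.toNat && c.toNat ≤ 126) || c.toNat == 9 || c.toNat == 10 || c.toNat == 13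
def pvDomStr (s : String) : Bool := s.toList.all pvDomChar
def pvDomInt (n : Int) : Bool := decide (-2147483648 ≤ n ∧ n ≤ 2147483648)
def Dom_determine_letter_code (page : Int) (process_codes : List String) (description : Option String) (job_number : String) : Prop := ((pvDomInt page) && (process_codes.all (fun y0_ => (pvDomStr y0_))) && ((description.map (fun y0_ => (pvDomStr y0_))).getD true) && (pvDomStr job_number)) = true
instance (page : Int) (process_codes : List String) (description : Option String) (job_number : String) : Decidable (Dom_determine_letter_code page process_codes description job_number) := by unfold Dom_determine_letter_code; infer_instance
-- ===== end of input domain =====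

-- B accumulates four flags in one pass and builds the result string compositionally; objective: alternative.

-- ===== PORT A =====
def determine_letter_code (page : Int) (process_codes : List String) (description : Option String) (job_number : String) : String :=
  -- description.upper() if description else ""  (truthy = some nonempty string)
  let _description_upper : String :=
    match description with
    | some d => if d ≠ "" then PySem.Str.upper d else ""
    | none => ""
  let process_codes_upper := process_codes.map PySem.Str.upper
  let has_hw := process_codes_upper.contains "HW"
  if process_codes_upper.contains "AP" && process_codes_upper.contains "EM" then
    if has_hw then "HW/EMB" else "SUB/EMB"
  else if process_codes_upper.contains "AP" then
    if has_hw then "HW/SUB" else "SUB"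
  else if process_codes_upper.contains "EM" then
    if has_hw then "HW/EMB" else "EMB"
  else if process_codes_upper.contains "DS" then
    if has_hw then "HW/ETCH" else "ETCH"
  else if has_hw then "HW"
  else ""

-- ===== PORT B =====
def determine_letter_code_alt (page : Int) (process_codes : List String) (description : Option String) (job_number : String) : String :=
  let flags := process_codes.foldl
    (fun (s : Bool × Bool × Bool × Bool) code =>
      let u := PySem.Str.upper code
      (s.1 || u == "AP", s.2.1 || u == "EM", s.2.2.1 || u == "DS", s.2.2.2 || u == "HW"))
    (false, false, false, false)
  let ap := flags.1
  let em := flags.2.1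
  let ds := flags.2.2.1
  let hw := flags.2.2.2
  if hw then
    let suffix := if em then "EMB" else if ap then "SUB" else if ds then "ETCH" else ""
    if suffix ≠ "" then "HW/" ++ suffix else "HW"
  else
    let parts := (if ap then ["SUB"] else []) ++ (if em then ["EMB"] else [])
    if parts ≠ [] then PySem.Str.join "/" parts
    else if ds then "ETCH" else ""

-- ===== PRECONDITION & SPEC =====
def Spec_determine_letter_code (page : Int) (process_codes : List String) (description : Option String) (job_number : String) (out : String) : Prop := out = determine_letter_code_alt page process_codes description job_number
instance (page : Int) (process_codes : List String) (description : Option String) (job_number : String) (out : String) : Decidable (Spec_determine_letter_code page process_codes description job_number out) := by unfold Spec_determine_letter_code; infer_instance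

-- ===== CLAIM (what is proved, stated in full; the proofs are below) =====
def Claim_equal_determine_letter_code : Prop := ∀ (page : Int) (process_codes : List String) (description : Option String) (job_number : String), Dom_determine_letter_code page process_codes description job_number → Spec_determine_letter_code page process_codes description job_number (determine_letter_code page process_codes description job_number)

-- ===== LEMMAS AND PROOFS =====
-- The one-pass flag fold computes exactly the four memberships of the uppercased list.
theorem flags_fold_eq (codes : List String) (s : Bool × Bool × Bool × Bool) :
    codes.foldl
      (fun (s : Bool × Bool × Bool × Bool) code =>
        let u := PySem.Str.upper code
        (s.1 || u == "AP", s.2.1 || u == "EM", s.2.2.1 || u == "DS", s.2.2.2 || u == "HW"))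
      s
    = (s.1 || (codes.map PySem.Str.upper).contains "AP",
       s.2.1 || (codes.map PySem.Str.upper).contains "EM",
       s.2.2.1 || (codes.map PySem.Str.upper).contains "DS",
       s.2.2.2 || (codes.map PySem.Str.upper).contains "HW") := by
  induction codes generalizing s with
  | nil => simp
  | cons c cs ih =>
    simp only [List.foldl_cons, ih, List.map_cons, List.contains_cons]
    obtain ⟨a, b, d, e⟩ := s
    simp [Bool.or_assoc, BEq.comm]

-- ===== VERDICT (by name: the statement is the Claim_ definition above) =====
theorem determine_letter_code_spec : Claim_equal_determine_letter_code := by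
  intro page process_codes description job_number _
  unfold Spec_determine_letter_code determine_letter_code determine_letter_code_alt
  simp only [flags_fold_eq, Bool.false_or]
  set l := process_codes.map PySem.Str.upper with hl
  by_cases hap : ("AP" : String) ∈ l <;>
  by_cases hem : ("EM" : String) ∈ l <;>
  by_cases hds : ("DS" : String) ∈ l <;>
  by_cases hhw : ("HW" : String) ∈ l <;>
  simp [hap, hem, hds, hhw] <;> decide
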